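-- pv_equiv track=rewrite | github.com/jomag/advent-of-code | 2025/day3/day3.py | part1
-- ===== SOURCE A (Python) =====
-- def part1(data, verbose=False):
--     tot = 0
--     for bank in data:
--         best = 0
--         for i in range(len(bank)):
--             for j in range(i+1, len(bank)):
--                 jolt = bank[i] * 10 + bank[j]
--                 best = max(jolt, best)
--         tot += best
--
--     return tot
-- ===== SOURCE B (Python) =====
-- def part1(data, verbose=False):
--     # One right-to-left pass per bank with a running suffix max (O(n) per bank vs A's O(n^2))
--     tot = 0
--     for bank in data:
--         best = 0
--         suf = None
--         for x in reversed(bank):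
--             if suf is not None:
--                 best = max(best, 10 * x + suf)
--             suf = x if suf is None else max(suf, x)
--         tot += best
--     return tot
-- ===== Notes on version B (the rewrite author's own statement) =====
-- stated objective: faster
-- what changed: Replaces the O(n^2) inner double loop over index pairs with a single right-to-left pass per bank keeping a running suffix maximum, so best = max over i of 10*bank[i] + max(bank[i+1:]) is computed in one scan.
import Mathlib
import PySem

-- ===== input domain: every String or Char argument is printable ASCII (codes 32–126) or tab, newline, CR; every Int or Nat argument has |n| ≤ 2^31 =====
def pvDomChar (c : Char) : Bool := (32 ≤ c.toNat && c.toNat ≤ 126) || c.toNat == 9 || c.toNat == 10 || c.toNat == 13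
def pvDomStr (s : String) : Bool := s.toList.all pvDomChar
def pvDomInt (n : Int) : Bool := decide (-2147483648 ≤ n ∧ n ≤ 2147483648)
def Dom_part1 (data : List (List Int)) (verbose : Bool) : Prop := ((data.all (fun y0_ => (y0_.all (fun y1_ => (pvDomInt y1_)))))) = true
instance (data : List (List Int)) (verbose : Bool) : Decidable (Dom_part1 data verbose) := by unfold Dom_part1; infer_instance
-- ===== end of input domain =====

-- B replaces A's quadratic inner pair-scan per bank by a single right-to-left pass with a running suffix maximum (faster, asymptotic).


-- ===== PORT A =====
def part1 (data : List (List Int)) (verbose : Bool) : Int :=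
  data.foldl (fun tot bank =>
    tot + (PySem.List.pyRange 0 (PySem.List.len bank) 1).foldl (fun best i =>
      (PySem.List.pyRange (i + 1) (PySem.List.len bank) 1).foldl (fun best j =>
        max (PySem.List.pyGetD bank i 0 * 10 + PySem.List.pyGetD bank j 0) best) best) 0) 0

-- ===== PORT B =====
-- one step of B's reversed loop: (best, suffix-max-so-far)
def bankStep (st : Int × Option Int) (x : Int) : Int × Option Int :=
  ((match st.2 with
    | none => st.1
    | some s => max st.1 (10 * x + s)),
   (match st.2 with
    | none => some x
    | some s => some (max s x)))

def part1_alt (data : List (List Int)) (verbose : Bool) : Int :=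
  data.foldl (fun tot bank => tot + (bank.reverse.foldl bankStep (0, (none : Option Int))).1) 0

-- ===== PRECONDITION & SPEC =====
def Spec_part1 (data : List (List Int)) (verbose : Bool) (out : Int) : Prop := out = part1_alt data verbose
instance (data : List (List Int)) (verbose : Bool) (out : Int) : Decidable (Spec_part1 data verbose out) := by unfold Spec_part1; infer_instance

-- ===== CLAIM (what is proved, stated in full; the proofs are below) =====
def Claim_equal_part1 : Prop := ∀ (data : List (List Int)) (verbose : Bool), Dom_part1 data verbose → Spec_part1 data verbose (part1 data verbose)

-- ===== LEMMAS AND PROOFS =====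

-- structural view of A's outer-i / inner-j loops acting on the remaining suffix of the bank
def procA (b : Int) (l : List Int) : Int :=
  match l with
  | [] => b
  | x :: xs => procA (xs.foldl (fun bb y => max (x * 10 + y) bb) b) xs

-- structural (foldr) view of B's loop over reversed(bank)
def gB (l : List Int) : Int × Option Int := l.foldr (fun x st => bankStep st x) (0, none)

lemma foldl_max_init (zs : List Int) : ∀ a b : Int, zs.foldl max (max a b) = max a (zs.foldl max b) := by
  induction zs with
  | nil => intro a b; simp
  | cons w ws ih =>
      intro a b
      simp only [List.foldl_cons, max_assoc]
      exact ih a (max b w)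

lemma foldl_maxjolt (ys : List Int) : ∀ (y c b : Int),
    (y :: ys).foldl (fun bb z => max (c + z) bb) b = max b (c + ys.foldl max y) := by
  induction ys with
  | nil => intro y c b; simp [max_comm]
  | cons z zs ih =>
      intro y c b
      have h1 : (y :: z :: zs).foldl (fun bb w => max (c + w) bb) b
          = (z :: zs).foldl (fun bb w => max (c + w) bb) (max (c + y) b) := by
        simp [List.foldl_cons]
      rw [h1, ih z c (max (c + y) b)]
      have h2 : zs.foldl max (max y z) = max y (zs.foldl max z) := foldl_max_init zs y z
      rw [List.foldl_cons, h2]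
      omega

lemma gB_snd (l : List Int) :
    (gB l).2 = match l with
               | [] => none
               | y :: ys => some (ys.foldl max y) := by
  induction l with
  | nil => rfl
  | cons x xs ih =>
      have hx : gB (x :: xs) = bankStep (gB xs) x := rfl
      cases xs with
      | nil => simp [bankStep, gB]
      | cons y ys =>
          simp only at ih
          simp only [hx, bankStep, ih]
          have := foldl_max_init ys x y
          simp [List.foldl_cons, this, max_comm]

lemma gB_fst_nonneg (l : List Int) : 0 ≤ (gB l).1 := by
  induction l with
  | nil => simp [gB]
  | cons x xs ih =>
      have hx : gB (x :: xs) = bankStep (gB xs) x := rfl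
      rw [hx]
      cases h : (gB xs).2 with
      | none => simpa [bankStep, h] using ih
      | some s =>
          simp only [bankStep, h]
          exact le_trans ih (le_max_left _ _)

lemma procA_eq_gB (l : List Int) : ∀ b : Int, 0 ≤ b → procA b l = max b (gB l).1 := by
  induction l with
  | nil => intro b hb; simp [procA, gB]; omega
  | cons x xs ih =>
      intro b hb
      have hx : gB (x :: xs) = bankStep (gB xs) x := rfl
      cases xs with
      | nil =>
          simp [procA, bankStep, gB]; omega
      | cons y ys =>
          have hfold := foldl_maxjolt ys y (x * 10) b
          have hb' : 0 ≤ max b (x * 10 + ys.foldl max y) := le_trans hb (le_max_left _ _)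
          have hsnd : (gB (y :: ys)).2 = some (ys.foldl max y) := by
            rw [gB_snd]
          calc procA b (x :: y :: ys)
              = procA ((y :: ys).foldl (fun bb z => max (x * 10 + z) bb) b) (y :: ys) := rfl
            _ = procA (max b (x * 10 + ys.foldl max y)) (y :: ys) := by rw [hfold]
            _ = max (max b (x * 10 + ys.foldl max y)) (gB (y :: ys)).1 := ih _ hb'
            _ = max b (gB (x :: y :: ys)).1 := by
                  rw [hx]; simp only [bankStep, hsnd]; omega

lemma A_index (bank : List Int) : ∀ (k : Nat) (a b : Int), 0 ≤ a → bank.length ≤ a.toNat + k →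
    (PySem.List.pyRange a (PySem.List.len bank) 1).foldl (fun best i =>
      (PySem.List.pyRange (i + 1) (PySem.List.len bank) 1).foldl (fun best j =>
        max (PySem.List.pyGetD bank i 0 * 10 + PySem.List.pyGetD bank j 0) best) best) b
    = procA b (bank.drop a.toNat) := by
  intro k
  induction k with
  | zero =>
      intro a b ha hk
      have hnil : PySem.List.pyRange a (PySem.List.len bank) 1 = [] := by
        apply PySem.List.pyRange_one_eq_nil
        simp [PySem.List.len]; omega
      rw [hnil]
      rw [List.drop_eq_nil_of_le (by omega)]
      rfl
  | succ k ih =>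
      intro a b ha hk
      by_cases hlt : a.toNat < bank.length
      · have hcons : PySem.List.pyRange a (PySem.List.len bank) 1
            = a :: PySem.List.pyRange (a + 1) (PySem.List.len bank) 1 := by
          apply PySem.List.pyRange_one_cons
          simp [PySem.List.len]; omega
        rw [hcons, List.foldl_cons]
        have hinner : ∀ init : Int,
            (PySem.List.pyRange (a + 1) (PySem.List.len bank) 1).foldl (fun best j =>
              max (PySem.List.pyGetD bank a 0 * 10 + PySem.List.pyGetD bank j 0) best) init
            = (bank.drop (a + 1).toNat).foldl
                (fun acc y => max (PySem.List.pyGetD bank a 0 * 10 + y) acc) init := by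
          intro init
          exact PySem.List.foldl_pyRange_pyGetD bank 0
            (fun acc y => max (PySem.List.pyGetD bank a 0 * 10 + y) acc) init
            (a := a + 1) (by omega)
        rw [hinner]
        have hget : PySem.List.pyGetD bank a 0 = bank[a.toNat] := by
          rw [PySem.List.pyGetD_eq_getElem] <;> omega
        have hdrop : bank.drop a.toNat = bank[a.toNat] :: bank.drop (a.toNat + 1) :=
          List.drop_eq_getElem_cons hlt
        have ht : (a + 1).toNat = a.toNat + 1 := by omega
        rw [ih (a + 1) _ (by omega) (by omega), ht, hdrop]
        simp only [procA, hget]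
      · have hnil : PySem.List.pyRange a (PySem.List.len bank) 1 = [] := by
          apply PySem.List.pyRange_one_eq_nil
          simp [PySem.List.len]; omega
        rw [hnil, List.drop_eq_nil_of_le (by omega)]
        rfl

lemma bank_eq (bank : List Int) :
    (PySem.List.pyRange 0 (PySem.List.len bank) 1).foldl (fun best i =>
      (PySem.List.pyRange (i + 1) (PySem.List.len bank) 1).foldl (fun best j =>
        max (PySem.List.pyGetD bank i 0 * 10 + PySem.List.pyGetD bank j 0) best) best) 0
    = (bank.reverse.foldl bankStep (0, (none : Option Int))).1 := by
  have h1 := A_index bank bank.length 0 0 le_rfl (by simp)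
  have h2 : bank.reverse.foldl bankStep (0, (none : Option Int)) = gB bank := by
    rw [List.foldl_reverse]; rfl
  rw [h1, h2]
  simpa [Int.toNat_zero, List.drop_zero] using
    (procA_eq_gB bank 0 le_rfl).trans (max_eq_right (gB_fst_nonneg bank))

-- ===== VERDICT (by name: the statement is the Claim_ definition above) =====
theorem part1_spec : Claim_equal_part1 := by
  intro data verbose _
  unfold Spec_part1 part1 part1_alt
  have : (fun (tot : Int) (bank : List Int) =>
      tot + (PySem.List.pyRange 0 (PySem.List.len bank) 1).foldl (fun best i =>
        (PySem.List.pyRange (i + 1) (PySem.List.len bank) 1).foldl (fun best j =>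
          max (PySem.List.pyGetD bank i 0 * 10 + PySem.List.pyGetD bank j 0) best) best) 0)
      = (fun (tot : Int) (bank : List Int) =>
        tot + (bank.reverse.foldl bankStep (0, (none : Option Int))).1) := by
    funext tot bank
    rw [bank_eq]
  rw [this]
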